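-- pv_equiv track=rewrite | github.com/elterminad0r/backtobasics | python/mastermind.py | correct_digits
-- ===== SOURCE A (Python) =====
-- from collections import Counter
--
-- def correct_digits(master, guess):
--     # a set is a unique collection which supports fast membership testing.
--     # >>> {1, 2, 3}
--     # {1, 2, 3}
--     # >>> [1, 2, 3]
--     # [1, 2, 3]
--     # >>> {1, 2, 3, 2}
--     # {1, 2, 3}
--     # >>> set([1, 2, 3]) == {1, 2, 3}
--
--     # the Counter counts how many of each element there is
--     # In [3]: Counter("4444")
--     # Out[3]: Counter({'4': 4})
--     #
--     # In [4]: Counter("0112")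
--     # Out[4]: Counter({'1': 2, '0': 1, '2': 1})
--     #
--     # In [5]: Counter("01101110")
--     # Out[5]: Counter({'1': 5, '0': 3})
--
--     # In [2]: a = Counter("01110")
--
--     # In [3]: a
--     # Out[3]: Counter({'1': 3, '0': 2})
--     #
--     # In [4]: a['0']
--     # Out[4]: 2
--     #
--     # In [5]: a['2']
--     # Out[5]: 0
--
--     master_set = Counter(master)
--
--     in_place = 0
--     correct = 0
--
--     # enumerate means we don't have to do guess[i] - it tracks both items and
--     # their positions.
--     # >>> list(enumerate(["a", "b", "c"]))
--     # [(0, 'a'), (1, 'b'), (2, 'c')]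
--
--
--     # zip zips two lists together - it lets you iterate in parallel
--     # >>> list(zip("abc", "def"))
--     # [('a', 'd'), ('b', 'e'), ('c', 'f')]
--
--     # unpacking!! :D
--     # >>> ind, (digit, mst_digit) = (0, ('a', 'd'))
--     # >>> ind
--     # 0
--     # >>> digit
--     # 'a'
--     # >>> mst_digit
--     # 'd'
--
--     for ind, (digit, mst_digit) in enumerate(zip(guess, master)):
--         # if there are digits left
--         if master_set[digit] > 0:
--             # cross one off
--             master_set[digit] -= 1
--
--             # add another one that was correct
--             correct += 1
--
--         # if the zipped guess-master digits are equal
--         if digit == mst_digit: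
--             # add an in place correct value
--             in_place += 1
--
--     return correct, in_place
-- ===== SOURCE B (Python) =====
-- def correct_digits(master, guess):
--     L = min(len(master), len(guess))
--     gp = guess[:L]
--     in_place = sum(1 for a, b in zip(guess, master) if a == b)
--     correct = sum(min(gp.count(d), master.count(d)) for d in set(gp))
--     return correct, in_place
-- ===== Notes on version B (the rewrite author's own statement) =====
-- stated objective: idiomatic
-- what changed: Replaces A's single stateful loop with a decrementing Counter by two independent passes: a positional zip-count for in_place and a per-digit min-of-counts sum over set(guess[:L]) for correct.
import Mathlib
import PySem

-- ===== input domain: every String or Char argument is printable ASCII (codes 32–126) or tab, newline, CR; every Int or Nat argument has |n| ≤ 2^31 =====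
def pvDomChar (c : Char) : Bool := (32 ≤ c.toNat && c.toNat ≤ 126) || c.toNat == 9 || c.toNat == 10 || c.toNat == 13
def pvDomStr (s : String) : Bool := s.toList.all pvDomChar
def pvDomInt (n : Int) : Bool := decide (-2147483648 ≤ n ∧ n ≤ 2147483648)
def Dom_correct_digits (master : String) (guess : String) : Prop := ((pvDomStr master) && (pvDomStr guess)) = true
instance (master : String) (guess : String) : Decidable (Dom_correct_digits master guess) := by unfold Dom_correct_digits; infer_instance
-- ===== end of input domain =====

-- B replaces A's single stateful loop (decrementing Counter + positional test) by two
-- independent passes: a positional zip-count for in_place and a per-digit min-of-counts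
-- sum over set(guess[:L]) for correct (objective: idiomatic; same asymptotic cost).

-- ===== PORT A =====
-- loop body of A: state is (master_set, in_place, correct); p = (index, (digit, mst_digit))
def pvStepA (s : PySem.Dict Char Int × Int × Int) (p : Int × Char × Char) :
    PySem.Dict Char Int × Int × Int :=
  let ms := s.1
  let in_place := s.2.1
  let correct := s.2.2
  let digit := p.2.1
  let mst_digit := p.2.2
  -- if master_set[digit] > 0: master_set[digit] -= 1; correct += 1   (Counter: default 0)
  let ms2 := if ms.getD digit 0 > 0 then ms.modify digit 0 (· - 1) else ms
  let correct2 := if ms.getD digit 0 > 0 then correct + 1 else correct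
  -- if digit == mst_digit: in_place += 1
  let in_place2 := if digit == mst_digit then in_place + 1 else in_place
  (ms2, in_place2, correct2)

def correct_digits (master : String) (guess : String) : Int × Int :=
  let master_set := PySem.Dict.counter master.toList
  let st := (PySem.List.enumerate (guess.toList.zip master.toList) 0).foldl pvStepA
              (master_set, 0, 0)
  (st.2.2, st.2.1)

-- ===== PORT B =====
def correct_digits_alt (master : String) (guess : String) : Int × Int :=
  let m := master.toList
  let g := guess.toList
  let L := min m.length g.length
  let gp := g.take L          -- guess[:L]; 0 ≤ L ≤ len(guess), so the slice is exactly take L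
  -- in_place = sum(1 for a, b in zip(guess, master) if a == b)
  let in_place : Int := ((g.zip m).countP (fun p => p.1 == p.2) : Nat)
  -- correct = sum(min(gp.count(d), master.count(d)) for d in set(gp))
  let correct : Int := ((PySem.Set.ofList gp).map (fun d => ((min (gp.count d) (m.count d) : Nat) : Int))).sum
  (correct, in_place)

-- ===== PRECONDITION & SPEC =====
def Spec_correct_digits (master : String) (guess : String) (out : Int × Int) : Prop := out = correct_digits_alt master guess
instance (master : String) (guess : String) (out : Int × Int) : Decidable (Spec_correct_digits master guess out) := by unfold Spec_correct_digits; infer_instance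

-- ===== CLAIM (what is proved, stated in full; the proofs are below) =====
def Claim_equal_correct_digits : Prop := ∀ (master : String) (guess : String), Dom_correct_digits master guess → Spec_correct_digits master guess (correct_digits master guess)

-- ===== LEMMAS AND PROOFS =====

-- the (master_set, correct) part of A's loop, with in_place and the unused index stripped
def pvGreedy (l : List Char) (st : PySem.Dict Char Int × Int) : PySem.Dict Char Int × Int :=
  l.foldl (fun s c => if s.1.getD c 0 > 0 then (s.1.modify c 0 (· - 1), s.2 + 1) else s) st

lemma pvLoopA_eq (z : List (Char × Char)) :
    ∀ (s0 : Int) (d : PySem.Dict Char Int) (ip cor : Int),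
    (PySem.List.enumerate z s0).foldl pvStepA (d, ip, cor)
      = ((pvGreedy (z.map Prod.fst) (d, cor)).1,
         ip + (z.countP (fun p => p.1 == p.2) : Int),
         (pvGreedy (z.map Prod.fst) (d, cor)).2) := by
  induction z with
  | nil => intro s0 d ip cor; simp [PySem.List.enumerate_nil, pvGreedy]
  | cons p t ih =>
      obtain ⟨pa, pb⟩ := p
      intro s0 d ip cor
      rw [PySem.List.enumerate_cons, List.foldl_cons]
      simp only [pvStepA]
      by_cases hc : d.getD pa 0 > 0
      · rw [if_pos hc, if_pos hc]
        by_cases he : pa = pb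
        · simp only [he, BEq.rfl, if_pos, ih, List.map_cons, List.countP_cons]
          have hg : pvGreedy (pb :: List.map Prod.fst t) (d, cor)
              = pvGreedy (List.map Prod.fst t) (d.modify pb 0 (· - 1), cor + 1) := by
            simp [pvGreedy, he ▸ hc]
          rw [hg]
          simp
          ring
        · have hbe : (pa == pb) = false := by simp [he]
          simp only [hbe, Bool.false_eq_true, if_false, ih, List.map_cons, List.countP_cons]
          have hg : pvGreedy (pa :: List.map Prod.fst t) (d, cor)
              = pvGreedy (List.map Prod.fst t) (d.modify pa 0 (· - 1), cor + 1) := by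
            simp [pvGreedy, hc]
          rw [hg]
          simp
      · rw [if_neg hc, if_neg hc]
        by_cases he : pa = pb
        · simp only [he, BEq.rfl, if_pos, ih, List.map_cons, List.countP_cons]
          have hg : pvGreedy (pb :: List.map Prod.fst t) (d, cor)
              = pvGreedy (List.map Prod.fst t) (d, cor) := by
            simp [pvGreedy, he ▸ hc]
          rw [hg]
          simp
          ring
        · have hbe : (pa == pb) = false := by simp [he]
          simp only [hbe, Bool.false_eq_true, if_false, ih, List.map_cons, List.countP_cons]
          have hg : pvGreedy (pa :: List.map Prod.fst t) (d, cor)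
              = pvGreedy (List.map Prod.fst t) (d, cor) := by
            simp [pvGreedy, hc]
          rw [hg]
          simp

lemma pvSum_zero (a : Char) (t : List Char) (f : Char → Nat) (hfa : f a = 0) :
    (∑ c ∈ (a :: t).toFinset, ((min ((a :: t).count c) (f c) : Nat) : Int))
      = ∑ c ∈ t.toFinset, ((min (t.count c) (f c) : Nat) : Int) := by
  by_cases hat : a ∈ t.toFinset
  · rw [List.toFinset_cons, Finset.insert_eq_self.mpr hat]
    refine Finset.sum_congr rfl ?_
    intro c hct
    by_cases hca : c = a
    · subst hca; simp [hfa]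
    · rw [List.count_cons_of_ne (Ne.symm hca)]
  · rw [List.toFinset_cons, Finset.sum_insert hat]
    have h0 : ((min ((a :: t).count a) (f a) : Nat) : Int) = 0 := by simp [hfa]
    rw [h0, zero_add]
    refine Finset.sum_congr rfl ?_
    intro c hct
    have hca : c ≠ a := by rintro rfl; exact hat hct
    rw [List.count_cons_of_ne (Ne.symm hca)]

lemma pvSum_pos (a : Char) (t : List Char) (f : Char → Nat) (hfa : 0 < f a) :
    (∑ c ∈ (a :: t).toFinset, ((min ((a :: t).count c) (f c) : Nat) : Int))
      = 1 + ∑ c ∈ t.toFinset,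
          ((min (t.count c) (if c = a then f a - 1 else f c) : Nat) : Int) := by
  by_cases hat : a ∈ t.toFinset
  · rw [List.toFinset_cons, Finset.insert_eq_self.mpr hat]
    rw [← Finset.add_sum_erase _ _ hat, ← Finset.add_sum_erase _
        (fun c => ((min (t.count c) (if c = a then f a - 1 else f c) : Nat) : Int)) hat]
    have hrest : (∑ c ∈ t.toFinset.erase a, ((min ((a :: t).count c) (f c) : Nat) : Int))
        = ∑ c ∈ t.toFinset.erase a,
            ((min (t.count c) (if c = a then f a - 1 else f c) : Nat) : Int) := by
      refine Finset.sum_congr rfl ?_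
      intro c hc
      have hca : c ≠ a := Finset.ne_of_mem_erase hc
      rw [List.count_cons_of_ne (Ne.symm hca), if_neg hca]
    rw [hrest]
    have hhead : ((min ((a :: t).count a) (f a) : Nat) : Int)
        = 1 + ((min (t.count a) (f a - 1) : Nat) : Int) := by
      rw [List.count_cons_self]
      push_cast
      omega
    rw [hhead, if_pos rfl]
    ring
  · rw [List.toFinset_cons, Finset.sum_insert hat]
    have hnat : a ∉ t := fun h => hat (List.mem_toFinset.mpr h)
    have hhead : ((min ((a :: t).count a) (f a) : Nat) : Int) = 1 := by
      rw [List.count_cons_self, List.count_eq_zero_of_not_mem hnat]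
      simp; omega
    rw [hhead]
    congr 1
    refine Finset.sum_congr rfl ?_
    intro c hct
    have hca : c ≠ a := by rintro rfl; exact hat hct
    rw [List.count_cons_of_ne (Ne.symm hca), if_neg hca]

lemma pvGreedy_spec (l : List Char) :
    ∀ (d : PySem.Dict Char Int) (cor : Int) (f : Char → Nat),
    (∀ c, d.getD c 0 = (f c : Int)) →
    (pvGreedy l (d, cor)).2
      = cor + ∑ c ∈ l.toFinset, ((min (l.count c) (f c) : Nat) : Int) := by
  induction l with
  | nil => intro d cor f _; simp [pvGreedy]
  | cons a t ih =>
      intro d cor f hf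
      by_cases hpos : 0 < f a
      · have hda : d.getD a 0 > 0 := by rw [hf a]; exact_mod_cast hpos
        have hstep : pvGreedy (a :: t) (d, cor)
            = pvGreedy t (d.modify a 0 (· - 1), cor + 1) := by
          simp [pvGreedy, hda]
        have hf' : ∀ c, (d.modify a 0 (· - 1)).getD c 0
            = (((if c = a then f a - 1 else f c) : Nat) : Int) := by
          intro c
          by_cases hca : c = a
          · rw [hca, PySem.Dict.getD_modify_self, hf a, if_pos rfl]
            omega
          · rw [if_neg hca, PySem.Dict.getD_modify_of_ne d 0 (· - 1) hca, hf c]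
        rw [hstep, ih _ _ (fun c => if c = a then f a - 1 else f c) hf']
        rw [pvSum_pos a t f hpos]
        ring
      · have hfa : f a = 0 := by omega
        have hda : ¬ d.getD a 0 > 0 := by rw [hf a, hfa]; simp
        have hstep : pvGreedy (a :: t) (d, cor) = pvGreedy t (d, cor) := by
          simp [pvGreedy, hda]
        rw [hstep, ih _ _ f hf, pvSum_zero a t f hfa]

lemma pvMapFstZip (l1 l2 : List Char) : (l1.zip l2).map Prod.fst = l1.take l2.length := by
  induction l1 generalizing l2 with
  | nil => simp
  | cons a t ih => cases l2 <;> simp [ih]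

lemma pvOfListSum (l : List Char) (F : Char → Int) :
    ((PySem.Set.ofList l).map F).sum = ∑ c ∈ l.toFinset, F c := by
  have h1 : (PySem.Set.ofList l).toFinset = l.toFinset := by
    ext c; simp [PySem.Set.mem_ofList]
  rw [← h1, List.sum_toFinset F (PySem.Set.nodup_ofList l)]

-- ===== VERDICT (by name: the statement is the Claim_ definition above) =====
theorem correct_digits_spec : Claim_equal_correct_digits := by
  intro master guess _
  unfold Spec_correct_digits correct_digits correct_digits_alt
  dsimp only
  rw [pvLoopA_eq]
  rw [pvMapFstZip]
  have hf : ∀ c, (PySem.Dict.counter master.toList).getD c 0 = ((master.toList.count c : Nat) : Int) := by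
    intro c; rw [PySem.Dict.getD_counter]
  rw [pvGreedy_spec _ _ _ _ hf]
  rw [← List.take_eq_take_min]
  rw [pvOfListSum]
  simp
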